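-- pv_equiv track=rewrite | github.com/seororo358/AlgorithmEx | weekly_9th.py | solution
-- ===== SOURCE A (Python) =====
-- def find_child(graph, child, visited, a):
--     visited[a] = True
--     for i in graph[a]:
--         if visited[i]:
--             continue
--         child[a] += find_child(graph, child, visited, i)
--
--     return child[a]
--
-- def solution(n, wires):
--     graph = [[] for _ in range(n + 1)]
--     visited = [False] * (n + 1)
--     child = [1] * (n + 1)
--     for wire in wires:
--         graph[wire[0]].append(wire[1])
--         graph[wire[1]].append(wire[0])
--     child[1] = find_child(graph, child, visited, 1)
--
--     for i in range(1, n + 1):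
--         child[i] = abs(n - 2 * child[i])
--     answer = min(child[1:])
--
--     return answer
-- ===== SOURCE B (Python) =====
-- def solution(n, wires):
--     graph = [[] for _ in range(n + 1)]
--     for wire in wires:
--         graph[wire[0]].append(wire[1])
--         graph[wire[1]].append(wire[0])
--     child = [1] * (n + 1)
--     visited = [False] * (n + 1)
--     visited[1] = True
--     stack = [(1, 0)]
--     while stack:
--         a, k = stack[-1]
--         neighbors = graph[a]
--         if k < len(neighbors):
--             stack[-1] = (a, k + 1)
--             i = neighbors[k]
--             if not visited[i]:
--                 visited[i] = True
--                 stack.append((i, 0))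
--         else:
--             stack.pop()
--             if stack:
--                 child[stack[-1][0]] += child[a]
--     return min(abs(n - 2 * child[i]) for i in range(1, n + 1))
-- ===== Notes on version B (the rewrite author's own statement) =====
-- stated objective: alternative
-- what changed: The recursive find_child DFS is replaced by an iterative post-order DFS over an explicit stack of (node, next-neighbor-index) frames that adds each completed frame's size to its parent frame, removing recursion (and its depth limit); the adjacency-list build and the final min of |n - 2*size| are unchanged.
import Mathlib
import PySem

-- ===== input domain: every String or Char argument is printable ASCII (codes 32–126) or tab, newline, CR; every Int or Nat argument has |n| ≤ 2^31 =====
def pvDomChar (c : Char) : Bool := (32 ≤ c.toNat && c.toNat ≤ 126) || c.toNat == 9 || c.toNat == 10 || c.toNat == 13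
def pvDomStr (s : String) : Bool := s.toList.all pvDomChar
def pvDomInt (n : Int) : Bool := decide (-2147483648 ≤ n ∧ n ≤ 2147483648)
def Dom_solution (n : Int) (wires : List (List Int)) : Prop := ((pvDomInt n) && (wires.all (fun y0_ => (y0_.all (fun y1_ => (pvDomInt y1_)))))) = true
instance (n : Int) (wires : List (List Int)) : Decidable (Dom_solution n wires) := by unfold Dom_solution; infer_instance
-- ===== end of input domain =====

-- B replaces A's recursive `find_child` DFS by an iterative explicit-stack post-order DFS
-- (same adjacency-list build, same node-1 root, same final min of |n - 2*size|); objective: alternative.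
-- A mutates no caller-visible argument; the wires list itself is never modified by either version.

-- Python negative index wraparound: index x into a list of length m
def pvNorm (m : Nat) (x : Int) : Nat := (if x < 0 then x + m else x).toNat
def pvGetI (l : List Int) (i : Nat) : Int := l.getD i 0
def pvGetB (l : List Bool) (i : Nat) : Bool := l.getD i false
def pvGetG (g : List (List Int)) (i : Nat) : List Int := g.getD i []

-- shared adjacency-list build (this loop is literally identical in A and B)
def pvBuild (m : Nat) (wires : List (List Int)) : List (List Int) :=
  wires.foldl (fun g w =>
    let a := (PySem.List.pyGet? w 0).getD 0
    let b := (PySem.List.pyGet? w 1).getD 0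
    let g1 := g.set (pvNorm m a) (pvGetG g (pvNorm m a) ++ [b])
    g1.set (pvNorm m b) (pvGetG g1 (pvNorm m b) ++ [a]))
  (List.replicate m [])

-- ===== PORT A =====
-- find_child / its neighbor loop; fuel is a totality device only (each call marks a fresh node,
-- so fuel = number of cells suffices; proved in the lemmas below)
mutual
def pvFindA (g : List (List Int)) (m : Nat) : Nat → Int → List Int → List Bool → Int × List Int × List Bool
  | 0, _, child, visited => (0, child, visited)
  | fuel+1, a, child, visited =>
    let visited1 := visited.set (pvNorm m a) true
    let p := pvLoopA g m fuel a (pvGetG g (pvNorm m a)) child visited1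
    (pvGetI p.1 (pvNorm m a), p.1, p.2)
  termination_by fuel _ _ _ => (fuel, 0)
def pvLoopA (g : List (List Int)) (m : Nat) : Nat → Int → List Int → List Int → List Bool → List Int × List Bool
  | _, _, [], child, visited => (child, visited)
  | fuel, a, i :: is, child, visited =>
    if pvGetB visited (pvNorm m i) then pvLoopA g m fuel a is child visited
    else
      let old := pvGetI child (pvNorm m a)
      let q := pvFindA g m fuel i child visited
      pvLoopA g m fuel a is ((q.2.1).set (pvNorm m a) (old + q.1)) q.2.2
  termination_by fuel _ is _ _ => (fuel, is.length + 1)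
end

def solution (n : Int) (wires : List (List Int)) : Int :=
  let m := (n + 1).toNat
  let graph := pvBuild m wires
  let child := List.replicate m (1 : Int)
  let visited := List.replicate m false
  let p := pvFindA graph m m 1 child visited
  let child1 := p.2.1.set (pvNorm m 1) p.1
  let child2 := (PySem.List.pyRange 1 (n + 1) 1).foldl
    (fun c i => c.set (pvNorm m i) (|n - 2 * pvGetI c (pvNorm m i)|)) child1
  (PySem.List.min? (PySem.List.slice child2 (some 1) none) (fun x => x)).getD 0

-- ===== PORT B =====
-- iterative post-order DFS over an explicit stack of (node, next-neighbor-index) frames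
def pvRunB (g : List (List Int)) (m : Nat) : Nat → List (Int × Nat) → List Int → List Bool → List Int × List Bool
  | 0, _, child, visited => (child, visited)
  | _+1, [], child, visited => (child, visited)
  | fuel+1, (a, k) :: rest, child, visited =>
    if k < (pvGetG g (pvNorm m a)).length then
      let i := pvGetI (pvGetG g (pvNorm m a)) k
      if pvGetB visited (pvNorm m i) then pvRunB g m fuel ((a, k+1) :: rest) child visited
      else pvRunB g m fuel ((i, 0) :: (a, k+1) :: rest) child (visited.set (pvNorm m i) true)
    else
      match rest with
      | [] => pvRunB g m fuel [] child visited
      | (b, _) :: _ =>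
        pvRunB g m fuel rest
          (child.set (pvNorm m b) (pvGetI child (pvNorm m b) + pvGetI child (pvNorm m a))) visited

def solution_alt (n : Int) (wires : List (List Int)) : Int :=
  let m := (n + 1).toNat
  let graph := pvBuild m wires
  let child := List.replicate m (1 : Int)
  let visited := (List.replicate m false).set (pvNorm m 1) true
  -- fuel is a totality device only; m * (3 + total adjacency length) + 1 steps always suffice (proved below)
  let fuelB := m * (3 + (graph.map List.length).sum) + 1
  let p := pvRunB graph m fuelB [(1, 0)] child visited
  (PySem.List.min? ((PySem.List.pyRange 1 (n + 1) 1).map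
      (fun i => |n - 2 * pvGetI p.1 (pvNorm m i)|)) (fun x => x)).getD 0

-- ===== PRECONDITION & SPEC =====
-- Pre_ excludes exactly the inputs where Python A raises: n ≤ 0 (empty `child[1:]` → ValueError, or
-- missing index 1 → IndexError) and wires whose first two entries are too short or index outside
-- [-(n+1), n] (IndexError).  A's RecursionError on inputs exceeding the interpreter's recursion
-- limit is an interpreter resource limit, not modelled here.
def Pre_solution (n : Int) (wires : List (List Int)) : Prop :=
  1 ≤ n ∧ ∀ w ∈ wires, 2 ≤ w.length ∧ ∀ x ∈ w.take 2, -(n + 1) ≤ x ∧ x ≤ n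
instance (n : Int) (wires : List (List Int)) : Decidable (Pre_solution n wires) := by
  unfold Pre_solution; infer_instance
def pvWitness_solution : Int × List (List Int) := (4, [[1, 2], [2, 3], [4, 1]])

def Spec_solution (n : Int) (wires : List (List Int)) (out : Int) : Prop := out = solution_alt n wires
instance (n : Int) (wires : List (List Int)) (out : Int) : Decidable (Spec_solution n wires out) := by
  unfold Spec_solution; infer_instance

-- ===== CLAIM (what is proved, stated in full; the proofs are below) =====
def Claim_equal_solution : Prop := ∀ (n : Int) (wires : List (List Int)), Dom_solution n wires → Pre_solution n wires → Spec_solution n wires (solution n wires)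

-- ===== LEMMAS AND PROOFS =====

theorem pvGetB_set_self (v : List Bool) (j : Nat) (b : Bool) (h : j < v.length) :
    pvGetB (v.set j b) j = b := by
  simp [pvGetB, List.getD, List.getElem?_set_self, h]

theorem pvGetB_set_ne (v : List Bool) (j j' : Nat) (b : Bool) (h : j ≠ j') :
    pvGetB (v.set j b) j' = pvGetB v j' := by
  simp [pvGetB, List.getD, List.getElem?_set_ne h]

theorem pvGetI_set_self (l : List Int) (j : Nat) (x : Int) (h : j < l.length) :
    pvGetI (l.set j x) j = x := by
  simp [pvGetI, List.getD, List.getElem?_set_self, h]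

theorem pvGetI_set_ne (l : List Int) (j j' : Nat) (x : Int) (h : j ≠ j') :
    pvGetI (l.set j x) j' = pvGetI l j' := by
  simp [pvGetI, List.getD, List.getElem?_set_ne h]

theorem pvSet_getI_self (l : List Int) (j : Nat) : l.set j (pvGetI l j) = l := by
  by_cases h : j < l.length
  · apply List.ext_getElem (by simp)
    intro i h1 h2
    simp only [List.getElem_set]
    split
    · rename_i he; subst he
      simp [pvGetI, List.getD, List.getElem?_eq_getElem h]
    · rfl
  · exact List.set_eq_of_length_le (by omega)

theorem pvCountF_set_true (v : List Bool) (j : Nat) (h : j < v.length)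
    (hf : pvGetB v j = false) : (v.set j true).count false + 1 = v.count false := by
  induction v generalizing j with
  | nil => simp at h
  | cons x xs ih =>
    cases j with
    | zero =>
      simp [pvGetB] at hf
      simp [hf, List.count_cons]
    | succ j =>
      simp only [List.length_cons] at h
      have := ih j (by omega) (by simpa [pvGetB] using hf)
      simp [List.count_cons, this]
      omega

theorem pvCountF_pos (v : List Bool) (j : Nat) (h : j < v.length)
    (hf : pvGetB v j = false) : 1 ≤ v.count false := by
  have := pvCountF_set_true v j h hf
  omega

theorem pvGetG_mem (g : List (List Int)) (j : Nat) : pvGetG g j ∈ g ∨ pvGetG g j = [] := by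
  by_cases h : j < g.length
  · left
    rw [pvGetG, List.getD, List.getElem?_eq_getElem h]
    exact List.getElem_mem h
  · right
    have : g[j]? = none := List.getElem?_eq_none_iff.2 (by omega)
    simp [pvGetG, List.getD, this]

theorem pvLen_le_sum (l : List (List Int)) (x : List Int) (hx : x ∈ l) :
    x.length ≤ (l.map List.length).sum := by
  induction l with
  | nil => simp at hx
  | cons y ys ih =>
    rcases List.mem_cons.1 hx with rfl | hx
    · simp only [List.map_cons, List.sum_cons]
      omega
    · simp only [List.map_cons, List.sum_cons]
      have := ih hx
      omega

theorem pvMem_set {α : Type} (l : List α) (j : Nat) (v x : α) (h : x ∈ l.set j v) :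
    x = v ∨ x ∈ l := by
  induction l generalizing j with
  | nil => simp at h
  | cons y ys ih =>
    cases j with
    | zero =>
      rcases List.mem_cons.1 h with h | h
      · exact Or.inl h
      · exact Or.inr (List.mem_cons_of_mem _ h)
    | succ j =>
      rcases List.mem_cons.1 h with h | h
      · exact Or.inr (h ▸ List.mem_cons_self)
      · rcases ih j h with h | h
        · exact Or.inl h
        · exact Or.inr (List.mem_cons_of_mem _ h)

theorem pvGetB_replicate (k j : Nat) : pvGetB (List.replicate k false) j = false := by
  simp [pvGetB, List.getD, List.getElem?_replicate]
  split <;> simp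


theorem pvRunB_nil (g : List (List Int)) (m f : Nat) (c : List Int) (v : List Bool) :
    pvRunB g m f [] c v = (c, v) := by cases f <;> simp [pvRunB]

theorem pvRunB_adv_vis (g : List (List Int)) (m f : Nat) (a : Int) (k : Nat)
    (rest : List (Int × Nat)) (c : List Int) (v : List Bool)
    (h : k < (pvGetG g (pvNorm m a)).length)
    (hv : pvGetB v (pvNorm m (pvGetI (pvGetG g (pvNorm m a)) k)) = true) :
    pvRunB g m (f + 1) ((a, k) :: rest) c v = pvRunB g m f ((a, k + 1) :: rest) c v := by
  simp [pvRunB, h, hv]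

theorem pvRunB_adv_new (g : List (List Int)) (m f : Nat) (a : Int) (k : Nat)
    (rest : List (Int × Nat)) (c : List Int) (v : List Bool)
    (h : k < (pvGetG g (pvNorm m a)).length)
    (hv : pvGetB v (pvNorm m (pvGetI (pvGetG g (pvNorm m a)) k)) = false) :
    pvRunB g m (f + 1) ((a, k) :: rest) c v
      = pvRunB g m f ((pvGetI (pvGetG g (pvNorm m a)) k, 0) :: (a, k + 1) :: rest) c
          (v.set (pvNorm m (pvGetI (pvGetG g (pvNorm m a)) k)) true) := by
  simp [pvRunB, h, hv]

theorem pvRunB_pop_nil (g : List (List Int)) (m f : Nat) (a : Int) (k : Nat)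
    (c : List Int) (v : List Bool) (h : ¬ k < (pvGetG g (pvNorm m a)).length) :
    pvRunB g m (f + 1) [(a, k)] c v = pvRunB g m f [] c v := by
  simp [pvRunB, h]

theorem pvRunB_pop (g : List (List Int)) (m f : Nat) (a b : Int) (k k' : Nat)
    (rest : List (Int × Nat)) (c : List Int) (v : List Bool)
    (h : ¬ k < (pvGetG g (pvNorm m a)).length) :
    pvRunB g m (f + 1) ((a, k) :: (b, k') :: rest) c v
      = pvRunB g m f ((b, k') :: rest)
          (c.set (pvNorm m b) (pvGetI c (pvNorm m b) + pvGetI c (pvNorm m a))) v := by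
  simp [pvRunB, h]

def SimFind (g : List (List Int)) (m L fuel : Nat) : Prop :=
  ∀ (a : Int) (child : List Int) (visited : List Bool),
    child.length = m → visited.length = m →
    pvNorm m a < m → pvGetB visited (pvNorm m a) = false →
    visited.count false ≤ fuel →
    (∃ t d : Nat,
      (pvFindA g m fuel a child visited).2.2.count false + d = visited.count false
      ∧ t + 2 ≤ d * (3 + L)
      ∧ ∀ (rest : List (Int × Nat)) (f : Nat),
          pvRunB g m (t + f) ((a, 0) :: rest) child (visited.set (pvNorm m a) true)
            = pvRunB g m f ((a, (pvGetG g (pvNorm m a)).length) :: rest)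
                (pvFindA g m fuel a child visited).2.1 (pvFindA g m fuel a child visited).2.2)
    ∧ (∀ j, pvGetB visited j = true → pvGetB (pvFindA g m fuel a child visited).2.2 j = true)
    ∧ pvGetB (pvFindA g m fuel a child visited).2.2 (pvNorm m a) = true
    ∧ (∀ j, pvGetB visited j = true →
        pvGetI (pvFindA g m fuel a child visited).2.1 j = pvGetI child j)
    ∧ (pvFindA g m fuel a child visited).2.1.length = m
    ∧ (pvFindA g m fuel a child visited).2.2.length = m
    ∧ (pvFindA g m fuel a child visited).1
        = pvGetI (pvFindA g m fuel a child visited).2.1 (pvNorm m a)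

def SimLoop (g : List (List Int)) (m L fuel : Nat) : Prop :=
  ∀ (a : Int) (is : List Int) (k : Nat) (child : List Int) (visited : List Bool),
    child.length = m → visited.length = m →
    pvNorm m a < m → pvGetB visited (pvNorm m a) = true →
    is = (pvGetG g (pvNorm m a)).drop k → k ≤ (pvGetG g (pvNorm m a)).length →
    visited.count false ≤ fuel →
    (∃ t d : Nat,
      (pvLoopA g m fuel a is child visited).2.count false + d = visited.count false
      ∧ t ≤ is.length + d * (3 + L)
      ∧ ∀ (rest : List (Int × Nat)) (f : Nat),
          pvRunB g m (t + f) ((a, k) :: rest) child visited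
            = pvRunB g m f ((a, (pvGetG g (pvNorm m a)).length) :: rest)
                (pvLoopA g m fuel a is child visited).1 (pvLoopA g m fuel a is child visited).2)
    ∧ (∀ j, pvGetB visited j = true → pvGetB (pvLoopA g m fuel a is child visited).2 j = true)
    ∧ (∀ j, j ≠ pvNorm m a → pvGetB visited j = true →
        pvGetI (pvLoopA g m fuel a is child visited).1 j = pvGetI child j)
    ∧ (pvLoopA g m fuel a is child visited).1.length = m
    ∧ (pvLoopA g m fuel a is child visited).2.length = m


theorem pvDrop_cons {α : Type} (l : List α) (k : Nat) (i : α) (is' : List α)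
    (h : l.drop k = i :: is') :
    k < l.length ∧ l[k]? = some i ∧ l.drop (k + 1) = is' := by
  have hlt : k < l.length := by
    by_contra hc
    rw [List.drop_eq_nil_iff.mpr (by omega)] at h
    exact absurd h (by simp)
  refine ⟨hlt, ?_, ?_⟩
  · have : l[k]? = (l.drop k)[0]? := by
      rw [List.getElem?_drop, Nat.add_zero]
    rw [this, h]; rfl
  · have : l.drop (k + 1) = (l.drop k).drop 1 := by
      rw [List.drop_drop]
    rw [this, h]; rfl

theorem pvSim_loop (g : List (List Int)) (m L : Nat)
    (hL : ∀ j : Nat, (pvGetG g j).length ≤ L)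
    (hg : ∀ l ∈ g, ∀ x ∈ l, pvNorm m x < m)
    (fuel : Nat) (hF : SimFind g m L fuel) : SimLoop g m L fuel := by
  intro a is
  induction is with
  | nil =>
    intro k child visited hlc hlv ha hva his hk hcf
    have hkeq : k = (pvGetG g (pvNorm m a)).length := by
      have := List.drop_eq_nil_iff.mp his.symm
      omega
    subst hkeq
    have hun : pvLoopA g m fuel a [] child visited = (child, visited) := by
      simp [pvLoopA]
    rw [hun]
    exact ⟨⟨0, 0, by simp, by simp, fun rest f => by rw [Nat.zero_add]⟩,
      fun j h => h, fun j _ _ => rfl, hlc, hlv⟩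
  | cons i is' ih =>
    intro k child visited hlc hlv ha hva his hk hcf
    obtain ⟨hklt, hgetk, hdrop'⟩ := pvDrop_cons _ _ _ _ his.symm
    have hi : pvGetI (pvGetG g (pvNorm m a)) k = i := by
      simp [pvGetI, List.getD, hgetk]
    have hmemi : i ∈ pvGetG g (pvNorm m a) := List.mem_of_getElem? hgetk
    have hnb : pvGetG g (pvNorm m a) ∈ g := by
      rcases pvGetG_mem g (pvNorm m a) with h | h
      · exact h
      · rw [h] at hmemi; simp at hmemi
    have hni : pvNorm m i < m := hg _ hnb _ hmemi
    by_cases hv : pvGetB visited (pvNorm m i) = true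
    · have hun : pvLoopA g m fuel a (i :: is') child visited
          = pvLoopA g m fuel a is' child visited := by
        simp [pvLoopA, hv]
      obtain ⟨⟨t, d, hcnt, hb, hm⟩, mono, pres, plc, plv⟩ :=
        ih (k + 1) child visited hlc hlv ha hva hdrop'.symm (by omega) hcf
      rw [hun]
      refine ⟨⟨t + 1, d, hcnt, by simp only [List.length_cons]; omega, ?_⟩, mono, pres, plc, plv⟩
      intro rest f
      have h1 : t + 1 + f = (t + f) + 1 := by omega
      rw [h1, pvRunB_adv_vis g m (t + f) a k rest child visited hklt (by rw [hi]; exact hv)]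
      exact hm rest f
    · replace hv : pvGetB visited (pvNorm m i) = false := by
        simpa using hv
      obtain ⟨⟨t1, d1, hcnt1, hb1, hm1⟩, mono1, hvi, pres1, flc, flv, hr⟩ :=
        hF i child visited hlc hlv hni hv hcf
      have hun : pvLoopA g m fuel a (i :: is') child visited
          = pvLoopA g m fuel a is'
              ((pvFindA g m fuel i child visited).2.1.set (pvNorm m a)
                (pvGetI child (pvNorm m a) + (pvFindA g m fuel i child visited).1))
              (pvFindA g m fuel i child visited).2.2 := by
        simp [pvLoopA, hv]
      obtain ⟨⟨t2, d2, hcnt2, hb2, hm2⟩, mono2, pres2, plc, plv⟩ :=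
        ih (k + 1)
          ((pvFindA g m fuel i child visited).2.1.set (pvNorm m a)
            (pvGetI child (pvNorm m a) + (pvFindA g m fuel i child visited).1))
          (pvFindA g m fuel i child visited).2.2
          (by simp [flc]) flv ha (mono1 _ hva) hdrop'.symm (by omega) (by omega)
      rw [hun]
      refine ⟨⟨1 + t1 + 1 + t2, d1 + d2, by omega, ?_, ?_⟩, ?_, ?_, plc, plv⟩
      · have hd : (d1 + d2) * (3 + L) = d1 * (3 + L) + d2 * (3 + L) := by ring
        simp only [List.length_cons]
        omega
      · intro rest f
        have e1 : 1 + t1 + 1 + t2 + f = (t1 + (1 + (t2 + f))) + 1 := by omega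
        rw [e1, pvRunB_adv_new g m _ a k rest child visited hklt (by rw [hi]; exact hv)]
        rw [hi]
        rw [hm1 ((a, k + 1) :: rest) (1 + (t2 + f))]
        have e2 : 1 + (t2 + f) = (t2 + f) + 1 := by omega
        rw [e2, pvRunB_pop g m (t2 + f) i a _ (k + 1) rest _ _ (by omega)]
        rw [pres1 _ hva, ← hr]
        exact hm2 rest f
      · exact fun j hj => mono2 j (mono1 j hj)
      · intro j hne hj
        rw [pres2 j hne (mono1 j hj), pvGetI_set_ne _ _ _ _ (Ne.symm hne)]
        exact pres1 j hj

theorem pvSim_find (g : List (List Int)) (m L : Nat)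
    (hL : ∀ j : Nat, (pvGetG g j).length ≤ L)
    (hg : ∀ l ∈ g, ∀ x ∈ l, pvNorm m x < m) :
    ∀ fuel, SimFind g m L fuel := by
  intro fuel
  induction fuel with
  | zero =>
    intro a child visited hlc hlv ha hva hcf
    have h1 := pvCountF_pos visited (pvNorm m a) (by rw [hlv]; exact ha) hva
    exact absurd hcf (by omega)
  | succ fuel ihf =>
    have hloop := pvSim_loop g m L hL hg fuel ihf
    intro a child visited hlc hlv ha hva hcf
    have hav : pvNorm m a < visited.length := by rw [hlv]; exact ha
    have hun : pvFindA g m (fuel + 1) a child visited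
        = (pvGetI (pvLoopA g m fuel a (pvGetG g (pvNorm m a)) child
              (visited.set (pvNorm m a) true)).1 (pvNorm m a),
           (pvLoopA g m fuel a (pvGetG g (pvNorm m a)) child
              (visited.set (pvNorm m a) true)).1,
           (pvLoopA g m fuel a (pvGetG g (pvNorm m a)) child
              (visited.set (pvNorm m a) true)).2) := by
      simp [pvFindA]
    have hc1 : (visited.set (pvNorm m a) true).count false + 1 = visited.count false :=
      pvCountF_set_true visited _ hav hva
    obtain ⟨⟨t, d, hcnt, hb, hm⟩, mono, pres, plc, plv⟩ :=
      hloop a (pvGetG g (pvNorm m a)) 0 child (visited.set (pvNorm m a) true)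
        hlc (by simp [hlv]) ha (pvGetB_set_self visited _ true hav)
        List.drop_zero.symm (Nat.zero_le _) (by omega)
    have h1c : (pvFindA g m (fuel + 1) a child visited).1
        = pvGetI (pvLoopA g m fuel a (pvGetG g (pvNorm m a)) child
            (visited.set (pvNorm m a) true)).1 (pvNorm m a) := by rw [hun]
    have h21 : (pvFindA g m (fuel + 1) a child visited).2.1
        = (pvLoopA g m fuel a (pvGetG g (pvNorm m a)) child
            (visited.set (pvNorm m a) true)).1 := by rw [hun]
    have h22 : (pvFindA g m (fuel + 1) a child visited).2.2
        = (pvLoopA g m fuel a (pvGetG g (pvNorm m a)) child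
            (visited.set (pvNorm m a) true)).2 := by rw [hun]
    rw [h1c, h21, h22]
    refine ⟨⟨t, d + 1, by omega, ?_, hm⟩, ?_, ?_, ?_, plc, plv, rfl⟩
    · have h3 : (d + 1) * (3 + L) = d * (3 + L) + (3 + L) := by ring
      have h4 := hL (pvNorm m a)
      omega
    · intro j hj
      apply mono
      by_cases he : j = pvNorm m a
      · subst he; exact pvGetB_set_self visited _ true hav
      · rw [pvGetB_set_ne visited _ j true (Ne.symm he)]; exact hj
    · exact mono _ (pvGetB_set_self visited _ true hav)
    · intro j hj
      have hne : j ≠ pvNorm m a := by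
        intro he
        rw [he, hva] at hj
        exact absurd hj (by simp)
      apply pres j hne
      rw [pvGetB_set_ne visited _ j true (Ne.symm hne)]
      exact hj

theorem pvNorm_natCast (m j : Nat) : pvNorm m (j : Int) = j := by
  unfold pvNorm
  rw [if_neg (by omega)]
  omega

theorem pvNorm_lt (m : Nat) (x : Int) (h1 : -(m : Int) ≤ x) (h2 : x < m) :
    pvNorm m x < m := by
  unfold pvNorm
  split <;> omega

theorem pvGetI_eq_getElem (l : List Int) (j : Nat) (h : j < l.length) :
    pvGetI l j = l[j] := by
  simp [pvGetI, List.getD, List.getElem?_eq_getElem h]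

theorem pvBuildF_inv (m : Nat) (P : Int → Prop) (wires : List (List Int)) :
    ∀ g0 : List (List Int), (∀ l ∈ g0, ∀ x ∈ l, P x) →
    (∀ w ∈ wires, P ((PySem.List.pyGet? w 0).getD 0) ∧ P ((PySem.List.pyGet? w 1).getD 0)) →
    ∀ l ∈ wires.foldl (fun g w =>
      let a := (PySem.List.pyGet? w 0).getD 0
      let b := (PySem.List.pyGet? w 1).getD 0
      let g1 := g.set (pvNorm m a) (pvGetG g (pvNorm m a) ++ [b])
      g1.set (pvNorm m b) (pvGetG g1 (pvNorm m b) ++ [a])) g0, ∀ x ∈ l, P x := by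
  induction wires with
  | nil => intro g0 h0 _; simpa using h0
  | cons w ws ih =>
    intro g0 h0 hw
    rw [List.foldl_cons]
    have hPa : P ((PySem.List.pyGet? w 0).getD 0) := (hw w List.mem_cons_self).1
    have hPb : P ((PySem.List.pyGet? w 1).getD 0) := (hw w List.mem_cons_self).2
    apply ih
    · intro l hl x hx
      simp only at hl
      rcases pvMem_set _ _ _ _ hl with rfl | hl
      · rcases List.mem_append.1 hx with hx | hx
        · rcases pvGetG_mem (g0.set (pvNorm m ((PySem.List.pyGet? w 0).getD 0))
              (pvGetG g0 (pvNorm m ((PySem.List.pyGet? w 0).getD 0)) ++ [(PySem.List.pyGet? w 1).getD 0]))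
              (pvNorm m ((PySem.List.pyGet? w 1).getD 0)) with hmem | hnil
          · rcases pvMem_set _ _ _ _ hmem with heq | hmem2
            · rw [heq] at hx
              rcases List.mem_append.1 hx with hx2 | hx2
              · rcases pvGetG_mem g0 (pvNorm m ((PySem.List.pyGet? w 0).getD 0)) with hm3 | hn3
                · exact h0 _ hm3 _ hx2
                · rw [hn3] at hx2; simp at hx2
              · simp at hx2; rw [hx2]; exact hPb
            · exact h0 _ hmem2 _ hx
          · rw [hnil] at hx; simp at hx
        · simp at hx; rw [hx]; exact hPa
      · rcases pvMem_set _ _ _ _ hl with rfl | hl2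
        · rcases List.mem_append.1 hx with hx | hx
          · rcases pvGetG_mem g0 (pvNorm m ((PySem.List.pyGet? w 0).getD 0)) with hm3 | hn3
            · exact h0 _ hm3 _ hx
            · rw [hn3] at hx; simp at hx
          · simp at hx; rw [hx]; exact hPb
        · exact h0 _ hl2 _ hx
    · intro w' hw'
      exact hw w' (List.mem_cons_of_mem _ hw')

theorem pvFoldChar (n : Int) (m : Nat) (c : List Int) (hc : c.length = m) :
    ∀ K : Nat, K ≤ m →
    (((PySem.List.pyRange 1 (K : Int) 1).foldl
        (fun cc i => cc.set (pvNorm m i) (|n - 2 * pvGetI cc (pvNorm m i)|)) c).length = m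
    ∧ ∀ j : Nat, pvGetI ((PySem.List.pyRange 1 (K : Int) 1).foldl
        (fun cc i => cc.set (pvNorm m i) (|n - 2 * pvGetI cc (pvNorm m i)|)) c) j
      = if 1 ≤ j ∧ j < K then |n - 2 * pvGetI c j| else pvGetI c j) := by
  intro K
  induction K with
  | zero =>
    intro _
    rw [PySem.List.pyRange_one_eq_nil (by norm_num)]
    refine ⟨by simpa using hc, fun j => ?_⟩
    rw [if_neg (by omega)]
    simp
  | succ K ihK =>
    intro hKm
    by_cases hK0 : K = 0
    · subst hK0
      rw [show ((1 : Nat) : Int) = 1 by norm_num, PySem.List.pyRange_one_eq_nil (by norm_num)]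
      refine ⟨by simpa using hc, fun j => ?_⟩
      rw [if_neg (by omega)]
      simp
    · have h1K : (1 : Int) ≤ (K : Int) := by omega
      have hsplit : PySem.List.pyRange 1 ((K + 1 : Nat) : Int) 1
          = PySem.List.pyRange 1 (K : Int) 1 ++ [(K : Int)] := by
        rw [show ((K + 1 : Nat) : Int) = (K : Int) + 1 by push_cast; ring]
        exact PySem.List.pyRange_one_succ_right h1K
      obtain ⟨ihl, ihg⟩ := ihK (by omega)
      rw [hsplit, List.foldl_append]
      simp only [List.foldl_cons, List.foldl_nil]
      rw [pvNorm_natCast]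
      refine ⟨by simpa using ihl, fun j => ?_⟩
      by_cases hjK : j = K
      · subst hjK
        rw [pvGetI_set_self _ _ _ (by omega)]
        rw [ihg j, if_neg (by omega), if_pos (by omega)]
      · rw [pvGetI_set_ne _ _ _ _ (fun h => hjK h.symm)]
        rw [ihg j]
        by_cases hcond : 1 ≤ j ∧ j < K
        · rw [if_pos hcond, if_pos (by omega)]
        · rw [if_neg hcond, if_neg (by omega)]

theorem pvFinal (n : Int) (m : Nat) (hmz : (m : Int) = n + 1) (hm2 : 2 ≤ m)
    (c : List Int) (hc : c.length = m) :
    (PySem.List.min? (PySem.List.slice ((PySem.List.pyRange 1 (n + 1) 1).foldl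
        (fun cc i => cc.set (pvNorm m i) (|n - 2 * pvGetI cc (pvNorm m i)|)) c)
      (some 1) none) (fun x => x)).getD 0
    = (PySem.List.min? ((PySem.List.pyRange 1 (n + 1) 1).map
        (fun i => |n - 2 * pvGetI c (pvNorm m i)|)) (fun x => x)).getD 0 := by
  have hrange : (n + 1 : Int) = ((m : Nat) : Int) := by omega
  rw [hrange]
  obtain ⟨hl, hg⟩ := pvFoldChar n m c hc m (le_refl m)
  congr 1
  rw [PySem.List.slice_from_one, ← List.drop_one]
  congr 1
  apply List.ext_getElem
  · rw [List.length_drop, hl, List.length_map, PySem.List.length_pyRange_one]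
    omega
  · intro j h1 h2
    rw [List.getElem_drop]
    have hj : 1 + j < m := by
      rw [List.length_drop, hl] at h1
      omega
    rw [← pvGetI_eq_getElem _ _ (by omega)]
    rw [hg (1 + j), if_pos (by omega)]
    rw [List.getElem_map, PySem.List.getElem_pyRange_one]
    rw [show (1 : Int) + (j : Int) = ((1 + j : Nat) : Int) by push_cast; ring]
    rw [pvNorm_natCast]

theorem pvMain (n : Int) (wires : List (List Int)) (hpre : Pre_solution n wires) :
    solution n wires = solution_alt n wires := by
  obtain ⟨hn, hw⟩ := hpre
  simp only [solution, solution_alt]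
  have hm2 : 2 ≤ (n + 1).toNat := by omega
  have hmz : (((n + 1).toNat : Nat) : Int) = n + 1 := by omega
  set m := (n + 1).toNat with hmdef
  set g := pvBuild m wires with hgdef
  set L := (g.map List.length).sum with hLdef
  have hL : ∀ j : Nat, (pvGetG g j).length ≤ L := by
    intro j
    rcases pvGetG_mem g j with hmem | hnil
    · exact pvLen_le_sum _ _ hmem
    · rw [hnil]; simp [hLdef]
  have hg : ∀ l ∈ g, ∀ x ∈ l, pvNorm m x < m := by
    rw [hgdef]
    unfold pvBuild
    apply pvBuildF_inv m (fun x => pvNorm m x < m)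
    · intro l hl x hx
      rw [List.eq_of_mem_replicate hl] at hx
      simp at hx
    · intro w hww
      obtain ⟨hlen2, hbound⟩ := hw w hww
      obtain ⟨x0, x1, rest, rfl⟩ : ∃ x0 x1 r, w = x0 :: x1 :: r := by
        cases w with
        | nil => exact absurd hlen2 (by simp)
        | cons x0 w' =>
          cases w' with
          | nil => exact absurd hlen2 (by simp)
          | cons x1 r => exact ⟨x0, x1, r, rfl⟩
      have hg0 : (PySem.List.pyGet? (x0 :: x1 :: rest) 0).getD 0 = x0 := by
        simp [PySem.List.pyGet?_zero_cons]
      have hg1 : (PySem.List.pyGet? (x0 :: x1 :: rest) 1).getD 0 = x1 := by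
        simp [PySem.List.pyGet?, PySem.List.pyIdx?]
      have hb0 := hbound x0 (by simp)
      have hb1 := hbound x1 (by simp)
      constructor
      · rw [hg0]; exact pvNorm_lt m x0 (by omega) (by omega)
      · rw [hg1]; exact pvNorm_lt m x1 (by omega) (by omega)
  have hn1 : pvNorm m 1 = 1 := by simp [pvNorm]
  obtain ⟨⟨t, d, hcnt, hb, hmach⟩, _, _, _, plc, plv, hr⟩ :=
    pvSim_find g m L hL hg m 1 (List.replicate m (1 : Int)) (List.replicate m false)
      (by simp) (by simp) (by rw [hn1]; omega) (by rw [hn1]; exact pvGetB_replicate m 1)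
      (by simp)
  have hdm : d ≤ m := by
    have hcr : (List.replicate m false).count false = m := by simp
    omega
  have htF : t + 2 ≤ m * (3 + L) + 1 := by
    have := Nat.mul_le_mul_right (3 + L) hdm
    omega
  have hmachine : pvRunB g m (m * (3 + L) + 1) [(1, 0)]
      (List.replicate m (1 : Int)) ((List.replicate m false).set (pvNorm m 1) true)
      = ((pvFindA g m m 1 (List.replicate m (1 : Int)) (List.replicate m false)).2.1,
         (pvFindA g m m 1 (List.replicate m (1 : Int)) (List.replicate m false)).2.2) := by
    have hsplit : m * (3 + L) + 1 = t + (m * (3 + L) + 1 - t) := by omega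
    rw [hsplit, hmach [] (m * (3 + L) + 1 - t)]
    obtain ⟨f1, hf1⟩ : ∃ f1, m * (3 + L) + 1 - t = f1 + 1 := ⟨m * (3 + L) - t, by omega⟩
    rw [hf1, pvRunB_pop_nil g m f1 1 _ _ _ (by omega), pvRunB_nil]
  rw [hmachine]
  rw [hr, pvSet_getI_self]
  exact pvFinal n m hmz hm2 _ plc

-- ===== VERDICT (by name: the statement is the Claim_ definition above) =====
theorem solution_spec : Claim_equal_solution := by
  intro n wires _ hpre
  show solution n wires = solution_alt n wires
  exact pvMain n wires hpre
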